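-- pv_equiv track=rewrite | github.com/guilhermesantos18/Codewars | 49.py | sortme
-- ===== SOURCE A (Python) =====
-- def sortme(words):
--     lista_ordenada = []
--     abecedario = ['a', 'b', 'c', 'd', 'e', 'f', 'g', 'h', 'i', 'j', 'k', 'l', 'm', 'n', 'o', 'p', 'q', 'r',
--                   's', 't', 'u', 'v', 'w', 'x', 'y', 'z']
--     for letra in abecedario:
--         for palavra in words:
--             if letra.upper() in palavra[0] or letra in palavra[0]:
--                 lista_ordenada.append(palavra)
--     return lista_ordenada
-- ===== SOURCE B (Python) =====
-- def sortme(words):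
--     buckets = [[] for _ in range(26)]
--     for w in words:
--         i = ord(w[0].lower()) - ord('a')
--         if 0 <= i < 26:
--             buckets[i].append(w)
--     return [w for bucket in buckets for w in bucket]
-- ===== Notes on version B (the rewrite author's own statement) =====
-- stated objective: faster
-- what changed: Replaces A's 26 full scans of the input (one per alphabet letter) by a single-pass bucket sort: one array of 26 buckets indexed by ord(w[0].lower())-ord('a'), filled in one traversal and then concatenated.
import Mathlib
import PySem

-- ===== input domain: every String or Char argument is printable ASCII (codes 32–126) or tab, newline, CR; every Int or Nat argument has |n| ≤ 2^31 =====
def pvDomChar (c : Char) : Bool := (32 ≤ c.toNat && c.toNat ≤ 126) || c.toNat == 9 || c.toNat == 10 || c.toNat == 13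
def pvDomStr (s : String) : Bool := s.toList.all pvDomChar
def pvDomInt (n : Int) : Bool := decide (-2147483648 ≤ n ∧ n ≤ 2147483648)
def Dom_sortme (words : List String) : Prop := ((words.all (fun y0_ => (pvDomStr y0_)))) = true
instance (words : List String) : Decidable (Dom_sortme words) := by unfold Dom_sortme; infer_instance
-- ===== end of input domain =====

-- B replaces A's 26 repeated scans of the input by a single-pass bucket sort over an
-- array of 26 buckets indexed by ord(w[0].lower())-ord('a') (same return value on Pre_).

-- ===== PORT A =====
-- A's literal alphabet list
def abecedario : List Char :=
  ['a', 'b', 'c', 'd', 'e', 'f', 'g', 'h', 'i', 'j', 'k', 'l', 'm', 'n', 'o', 'p', 'q', 'r',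
   's', 't', 'u', 'v', 'w', 'x', 'y', 'z']

-- A's test `letra.upper() in palavra[0] or letra in palavra[0]`: membership of a 1-char string
-- in the 1-char string palavra[0] is character equality; palavra[0] on "" raises IndexError
-- (PySem.Str.pyGet? = none there; such inputs are excluded by Pre_, the `false` branch is never claimed)
def aCond (letra : Char) (palavra : String) : Bool :=
  match PySem.Str.pyGet? palavra 0 with
  | none => false
  | some c => decide (c = Char.toUpper letra) || decide (c = letra)

def sortme (words : List String) : List String :=
  abecedario.foldl (fun lista_ordenada letra =>
    words.foldl (fun acc palavra =>
      if aCond letra palavra then acc ++ [palavra] else acc) lista_ordenada) []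

-- ===== PORT B =====
-- ord(w[0].lower()) - ord('a'); w[0] on "" raises IndexError (none), excluded by Pre_;
-- Char.toLower is exact on ASCII
def bIdx (w : String) : Int :=
  ((Char.toLower ((PySem.Str.pyGet? w 0).getD ' ')).toNat : Int) - 97

-- the loop body: `if 0 <= i < 26: buckets[i].append(w)`
def bStep (buckets : List (List String)) (w : String) : List (List String) :=
  let i : Int := bIdx w
  if 0 ≤ i ∧ i < 26 then buckets.set i.toNat ((buckets.getD i.toNat []) ++ [w]) else buckets

def sortme_alt (words : List String) : List String :=
  (words.foldl bStep (List.replicate 26 [])).flatten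

-- ===== PRECONDITION & SPEC =====
-- A (and B) raise IndexError indexing w[0] when some word is the empty string; nothing else raises.
def Pre_sortme (words : List String) : Prop := "" ∉ words
instance (words : List String) : Decidable (Pre_sortme words) := by unfold Pre_sortme; infer_instance

def pvWitness_sortme : List String := ["banana", "Apple", "!x", "apple", "Zoo"]

def Spec_sortme (words : List String) (out : List String) : Prop := out = sortme_alt words
instance (words : List String) (out : List String) : Decidable (Spec_sortme words out) := by unfold Spec_sortme; infer_instance

-- ===== CLAIM (what is proved, stated in full; the proofs are below) =====
def Claim_equal_sortme : Prop := ∀ (words : List String), Dom_sortme words → Pre_sortme words → Spec_sortme words (sortme words)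

-- ===== LEMMAS AND PROOFS =====

-- the first character, lowercased (the bucket key both sides hinge on)
def keyNat (w : String) : ℕ := (Char.toLower ((PySem.Str.pyGet? w 0).getD ' ')).toNat

-- setting slot k of a bucket family given as a map over `range n`
theorem set_map_range {α : Type} (n k : ℕ) (f : ℕ → List α) (x : α) :
    ((List.range n).map f).set k (f k ++ [x]) =
      (List.range n).map (fun j => f j ++ if j = k then [x] else []) := by
  apply List.ext_getElem
  · simp
  · intro j h1 h2
    by_cases hj : j = k
    · simp [hj, List.getElem_map, List.getElem_range]
    · simp only [List.getElem_set, List.getElem_map, List.getElem_range]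
      rw [if_neg (fun h => hj h.symm)]
      simp [hj]

-- the fold over the words builds exactly the per-key filters of the input, in slot order
set_option maxRecDepth 4096 in
theorem fold_buckets (ws : List String) :
    ws.foldl bStep (List.replicate 26 []) =
      (List.range 26).map (fun k => ws.filter (fun w => decide (keyNat w = k + 97))) := by
  induction ws using List.reverseRecOn with
  | nil =>
    apply List.ext_getElem <;> simp
  | append_singleton t x ih =>
    rw [List.foldl_append, List.foldl_cons, List.foldl_nil, ih]
    unfold bStep bIdx
    simp only [List.filter_append, List.filter_singleton]
    by_cases hg : (0:Int) ≤ ((Char.toLower ((PySem.Str.pyGet? x 0).getD ' ')).toNat : Int) - 97 ∧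
        ((Char.toLower ((PySem.Str.pyGet? x 0).getD ' ')).toNat : Int) - 97 < 26
    · rw [if_pos hg]
      have hv : 97 ≤ keyNat x ∧ keyNat x < 123 := by unfold keyNat; omega
      have hi : (((Char.toLower ((PySem.Str.pyGet? x 0).getD ' ')).toNat : Int) - 97).toNat
          = keyNat x - 97 := by unfold keyNat; omega
      rw [hi]
      have hlt : keyNat x - 97 < 26 := by omega
      have hget : (((List.range 26).map
            (fun k => t.filter (fun w => decide (keyNat w = k + 97)))).getD (keyNat x - 97) [])
          = t.filter (fun w => decide (keyNat w = (keyNat x - 97) + 97)) := by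
        rw [List.getD_eq_getElem?_getD, List.getElem?_map, List.getElem?_range hlt]
        rfl
      rw [hget, set_map_range 26 (keyNat x - 97)
        (fun k => t.filter (fun w => decide (keyNat w = k + 97))) x]
      apply List.map_congr_left
      intro j hj
      by_cases h : j = keyNat x - 97
      · have e : keyNat x = j + 97 := by omega
        rw [if_pos h, decide_eq_true e]; rfl
      · have e : ¬ keyNat x = j + 97 := by omega
        rw [if_neg h, decide_eq_false e]; rfl
    · rw [if_neg hg]
      apply List.ext_getElem
      · simp
      · intro j h1 h2
        simp only [List.length_map, List.length_range] at h1
        have : ¬ (keyNat x = j + 97) := by unfold keyNat at *; omega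
        simp [this]

-- the character fact behind the bucket test, checked over all ASCII codes and all 26 slots
set_option maxRecDepth 8192 in
theorem char_table : ((List.range 127).all fun n => (List.range 26).all fun k =>
    ((decide (Char.ofNat n = Char.toUpper (Char.ofNat (k + 97))) ||
      decide (Char.ofNat n = Char.ofNat (k + 97)))
      == decide ((Char.toLower (Char.ofNat n)).toNat = k + 97))) = true := by
  decide

theorem char_bucket (c : Char) (hc : c.toNat < 127) (k : ℕ) (hk : k < 26) :
    (decide (c = Char.toUpper (Char.ofNat (k + 97))) || decide (c = Char.ofNat (k + 97)))
      = decide ((Char.toLower c).toNat = k + 97) := by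
  have h := List.all_eq_true.mp
    (List.all_eq_true.mp char_table c.toNat (List.mem_range.mpr hc))
    k (List.mem_range.mpr hk)
  rw [Char.ofNat_toNat] at h
  exact eq_of_beq h

-- A's per-word test on slot k equals B's bucket-key test (for ASCII words, nonempty)
theorem cond_eq (k : ℕ) (hk : k < 26) (w : String)
    (hdw : pvDomStr w = true) (hne : w ≠ "") :
    aCond (Char.ofNat (k + 97)) w = decide (keyNat w = k + 97) := by
  obtain ⟨c, t, hw⟩ : ∃ c t, w.toList = c :: t := by
    cases h : w.toList with
    | nil => exact absurd (String.toList_eq_nil_iff.mp h) hne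
    | cons c t => exact ⟨c, t, rfl⟩
  have hget : PySem.Str.pyGet? w 0 = some c := by
    simp [PySem.Str.pyGet?, PySem.Chars.pyGet?, PySem.List.pyGet?, PySem.List.pyIdx?, hw]
  have hc : pvDomChar c = true := by
    have := hdw
    unfold pvDomStr at this
    rw [hw] at this
    exact (List.all_eq_true.mp this) c (by simp)
  have hc' : c.toNat < 127 := by
    unfold pvDomChar at hc
    simp only [Bool.or_eq_true, Bool.and_eq_true, decide_eq_true_eq, beq_iff_eq] at hc
    omega
  unfold aCond keyNat
  rw [hget]
  exact char_bucket c hc' k hk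

-- A is the concatenation, letter by letter, of the words passing A's test
theorem A_shape (words : List String) :
    sortme words = abecedario.flatMap (fun l => words.filter (aCond l)) := by
  unfold sortme
  simp only [PySem.List.foldl_append_if_eq_filter]
  rw [PySem.List.foldl_append_eq_flatMap]
  simp

-- A's alphabet is the slot-order list of letters
theorem abecedario_eq : abecedario = (List.range 26).map (fun k => Char.ofNat (k + 97)) := by
  decide

-- ===== VERDICT (by name: the statement is the Claim_ definition above) =====
theorem sortme_spec : Claim_equal_sortme := by
  intro words hdom hpre
  unfold Spec_sortme sortme_alt
  rw [fold_buckets, A_shape, abecedario_eq, List.flatMap_map]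
  rw [List.flatten_eq_flatMap]
  rw [List.flatMap_map]
  apply List.flatMap_congr
  intro k hk
  apply List.filter_congr
  intro w hw
  exact cond_eq k (List.mem_range.mp hk) w (List.all_eq_true.mp hdom w hw)
    (fun e => hpre (e ▸ hw))
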